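-- pv_equiv track=rewrite | github.com/Jahnesta3rd/Mingus-2025 | backups/2025-07-19_22-44-19_production_ready/backend/services/onboarding_service.py | _get_primary_goal
-- ===== SOURCE A (Python) =====
-- def _get_primary_goal(goals: list) -> str:
--     """Get the primary goal from the list of financial goals"""
--     if not goals:
--         return 'save'
--
--     # Priority order for goals
--     priority_goals = ['emergency_fund', 'debt_payoff', 'savings', 'investment', 'retirement', 'home_purchase']
--
--     for goal in priority_goals:
--         if goal in goals:
--             return goal
--
--     return goals[0] if goals else 'save'
-- ===== SOURCE B (Python) =====
-- def _get_primary_goal(goals: list) -> str: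
--     """Get the primary goal from the list of financial goals"""
--     if not goals:
--         return 'save'
--
--     rank = {g: i for i, g in enumerate(
--         ['emergency_fund', 'debt_payoff', 'savings', 'investment', 'retirement', 'home_purchase'])}
--
--     best = None
--     for g in goals:
--         r = rank.get(g)
--         if r is not None and (best is None or r < best[1]):
--             best = (g, r)
--
--     return best[0] if best is not None else goals[0]
-- ===== Notes on version B (the rewrite author's own statement) =====
-- stated objective: alternative
-- what changed: Instead of scanning the constant priority list and testing membership in the input for each entry, B builds a rank dict from the priority list once and makes a single pass over the input goals keeping the goal with the smallest rank, with the same goals[0]/'save' fallbacks.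
import Mathlib
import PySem

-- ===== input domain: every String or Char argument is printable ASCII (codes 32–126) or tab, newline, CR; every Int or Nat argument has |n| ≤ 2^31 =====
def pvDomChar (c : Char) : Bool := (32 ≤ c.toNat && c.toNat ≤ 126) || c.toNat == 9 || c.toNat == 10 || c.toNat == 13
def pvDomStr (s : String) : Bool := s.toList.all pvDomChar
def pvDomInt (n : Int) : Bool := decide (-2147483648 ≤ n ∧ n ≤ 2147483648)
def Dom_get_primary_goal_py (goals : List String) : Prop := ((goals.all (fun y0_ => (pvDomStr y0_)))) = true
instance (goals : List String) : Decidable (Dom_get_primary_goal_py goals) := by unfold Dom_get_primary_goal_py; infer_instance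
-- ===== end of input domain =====

-- B replaces the membership scan of the constant priority list by a rank dict and
-- a single minimum-tracking pass over the input goals (objective: alternative).
-- ===== PORT A =====
def pgList : List String :=
  ["emergency_fund", "debt_payoff", "savings", "investment", "retirement", "home_purchase"]

-- the `for goal in priority_goals` loop of A: first priority goal contained in goals
def aLoop (ps : List String) (goals : List String) : Option String :=
  match ps with
  | [] => none
  | p :: t => if goals.contains p then some p else aLoop t goals

def get_primary_goal_py (goals : List String) : String :=
  if goals = [] then "save"
  else
    match aLoop pgList goals with
    | some g => g
    | none =>
      match goals with
      | [] => "save"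
      | x :: _ => x

-- ===== PORT B =====
-- rank = {g: i for i, g in enumerate(priority_goals)}
def rankDict : PySem.Dict String Int :=
  (PySem.List.enumerate pgList).foldl (fun d p => d.insert p.2 p.1) PySem.Dict.empty

-- one step of B's loop over goals
def bStep (best : Option (String × Int)) (g : String) : Option (String × Int) :=
  match PySem.Dict.get? rankDict g with
  | none => best
  | some r =>
    match best with
    | none => some (g, r)
    | some (_, br) => if r < br then some (g, r) else best

def get_primary_goal_py_alt (goals : List String) : String :=
  if goals = [] then "save"
  else
    match goals.foldl bStep none with
    | some (g, _) => g
    | none =>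
      match goals with
      | [] => "save"
      | x :: _ => x

-- ===== PRECONDITION & SPEC =====
def Spec_get_primary_goal_py (goals : List String) (out : String) : Prop := out = get_primary_goal_py_alt goals
instance (goals : List String) (out : String) : Decidable (Spec_get_primary_goal_py goals out) := by unfold Spec_get_primary_goal_py; infer_instance

-- ===== CLAIM (what is proved, stated in full; the proofs are below) =====
def Claim_equal_get_primary_goal_py : Prop := ∀ (goals : List String), Dom_get_primary_goal_py goals → Spec_get_primary_goal_py goals (get_primary_goal_py goals)

-- ===== LEMMAS AND PROOFS =====

/-- `pgList` entry at an integer rank (helper for the proofs). -/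
def pget (r : Int) : String := pgList.getD r.toNat ""

/-- minimum rank (under `rankDict`) occurring in `l`, `6` if none occurs. -/
def minr (l : List String) : Int :=
  l.foldr (fun g m => match PySem.Dict.get? rankDict g with
                      | some r => min r m
                      | none => m) 6

theorem rk_mem (g : String) (r : Int) (h : PySem.Dict.get? rankDict g = some r) :
    0 ≤ r ∧ r < 6 ∧ g = pget r := by
  have hd : rankDict = PySem.Dict.mk
      [("emergency_fund", 0), ("debt_payoff", 1), ("savings", 2),
       ("investment", 3), ("retirement", 4), ("home_purchase", 5)] := by decide
  rw [hd] at h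
  simp only [PySem.Dict.get?_mk_cons] at h
  split_ifs at h with h0 h1 h2 h3 h4 h5 <;>
    try (injection h with h'; subst h';
         first
           | exact ⟨by decide, by decide, by rw [← eq_of_beq h0]; decide⟩
           | exact ⟨by decide, by decide, by rw [← eq_of_beq h1]; decide⟩
           | exact ⟨by decide, by decide, by rw [← eq_of_beq h2]; decide⟩
           | exact ⟨by decide, by decide, by rw [← eq_of_beq h3]; decide⟩
           | exact ⟨by decide, by decide, by rw [← eq_of_beq h4]; decide⟩
           | exact ⟨by decide, by decide, by rw [← eq_of_beq h5]; decide⟩)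
  exact absurd h (by simp [PySem.Dict.get?])

theorem minr_cons_none (g : String) (t : List String)
    (hg : PySem.Dict.get? rankDict g = none) : minr (g :: t) = minr t := by
  simp only [minr, List.foldr_cons, hg]

theorem minr_cons_some (g : String) (t : List String) (r : Int)
    (hg : PySem.Dict.get? rankDict g = some r) : minr (g :: t) = min r (minr t) := by
  simp only [minr, List.foldr_cons, hg]

theorem minr_le6 (l : List String) : minr l ≤ 6 := by
  induction l with
  | nil => simp [minr]
  | cons g t ih =>
    cases h : PySem.Dict.get? rankDict g with
    | none => rw [minr_cons_none g t h]; exact ih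
    | some r => rw [minr_cons_some g t r h]; exact le_trans (min_le_right _ _) ih

theorem minr_nonneg (l : List String) : 0 ≤ minr l := by
  induction l with
  | nil => simp [minr]
  | cons g t ih =>
    cases h : PySem.Dict.get? rankDict g with
    | none => rw [minr_cons_none g t h]; exact ih
    | some r => rw [minr_cons_some g t r h]; exact le_min (rk_mem g r h).1 ih

/-- B's fold from a valid state computes the minimum rank. -/
theorem fold_some (l : List String) : ∀ (s : String) (r : Int), r < 6 → s = pget r →
    l.foldl bStep (some (s, r)) = some (pget (min r (minr l)), min r (minr l)) := by
  induction l with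
  | nil =>
    intro s r hr6 hs
    have hm : min r (minr ([] : List String)) = r := by
      have : minr ([] : List String) = 6 := by simp [minr]
      omega
    rw [List.foldl_nil, hm, ← hs]
  | cons g t ih =>
    intro s r hr6 hs
    rw [List.foldl_cons]
    cases h : PySem.Dict.get? rankDict g with
    | none =>
      rw [minr_cons_none g t h]
      simp only [bStep, h]
      exact ih s r hr6 hs
    | some r' =>
      obtain ⟨_, hr'6, hg⟩ := rk_mem g r' h
      rw [minr_cons_some g t r' h]
      simp only [bStep, h]
      by_cases hlt : r' < r
      · rw [if_pos hlt, ih g r' hr'6 hg]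
        have : min r' (minr t) = min r (min r' (minr t)) := by omega
        rw [← this]
      · rw [if_neg hlt, ih s r hr6 hs]
        have : min r (minr t) = min r (min r' (minr t)) := by omega
        rw [← this]

theorem fold_none (l : List String) :
    l.foldl bStep none =
      if minr l < 6 then some (pget (minr l), minr l) else none := by
  induction l with
  | nil => simp [minr]
  | cons g t ih =>
    rw [List.foldl_cons]
    cases h : PySem.Dict.get? rankDict g with
    | none =>
      rw [minr_cons_none g t h]
      simp only [bStep, h]
      exact ih
    | some r =>
      obtain ⟨h0, h6, hg⟩ := rk_mem g r h
      rw [minr_cons_some g t r h]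
      simp only [bStep, h]
      rw [fold_some t g r h6 hg]
      have hlt : min r (minr t) < 6 := by omega
      rw [if_pos hlt]

theorem mem_of_minr (l : List String) (h : minr l < 6) : pget (minr l) ∈ l := by
  induction l with
  | nil => simp [minr] at h
  | cons g t ih =>
    cases hg : PySem.Dict.get? rankDict g with
    | none =>
      rw [minr_cons_none g t hg] at h ⊢
      exact List.mem_cons_of_mem _ (ih h)
    | some r =>
      obtain ⟨_, _, hpg⟩ := rk_mem g r hg
      rw [minr_cons_some g t r hg] at h ⊢
      by_cases hle : r ≤ minr t
      · have hmin : min r (minr t) = r := by omega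
        rw [hmin, ← hpg]; exact List.mem_cons_self
      · have hmin : min r (minr t) = minr t := by omega
        rw [hmin]
        exact List.mem_cons_of_mem _ (ih (by omega))

theorem le_minr_of_mem (l : List String) (g : String) (r : Int)
    (hm : g ∈ l) (hr : PySem.Dict.get? rankDict g = some r) : minr l ≤ r := by
  induction l with
  | nil => simp at hm
  | cons g' t ih =>
    rcases List.mem_cons.1 hm with h | h
    · rw [minr_cons_some g' t r (by rw [← h]; exact hr)]; exact min_le_left _ _
    · cases hg' : PySem.Dict.get? rankDict g' with
      | none => rw [minr_cons_none g' t hg']; exact ih h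
      | some r' =>
        rw [minr_cons_some g' t r' hg']
        exact le_trans (min_le_right _ _) (ih h)

/-- membership of a concrete priority entry forces a bound on `minr`. -/
theorem minr_le_of_pget_mem (l : List String) (i : Int) (h0 : 0 ≤ i) (h6 : i < 6)
    (hm : pget i ∈ l) : minr l ≤ i := by
  have hr : PySem.Dict.get? rankDict (pget i) = some i := by
    interval_cases i <;> decide
  exact le_minr_of_mem l _ i hm hr

-- ===== VERDICT (by name: the statement is the Claim_ definition above) =====
theorem get_primary_goal_py_spec : Claim_equal_get_primary_goal_py := by
  intro goals _
  unfold Spec_get_primary_goal_py get_primary_goal_py get_primary_goal_py_alt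
  by_cases hnil : goals = []
  · simp [hnil]
  · rw [if_neg hnil, if_neg hnil, fold_none]
    have h0 := minr_nonneg goals
    have h6 := minr_le6 goals
    set m := minr goals with hm
    have hnotmem : ∀ (i : Int), 0 ≤ i → i < m → pget i ∉ goals := by
      intro i hi0 him hmem
      have := minr_le_of_pget_mem goals i hi0 (by omega) hmem
      omega
    have hcontains : ∀ (i : Int), 0 ≤ i → i < m → goals.contains (pget i) = false := by
      intro i hi0 him
      simpa using hnotmem i hi0 him
    interval_cases m
    · -- m = 0
      have hmem : pget 0 ∈ goals := by
        have := mem_of_minr goals (by omega)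
        rwa [← hm] at this
      have ck : goals.contains "emergency_fund" = true := by
        rw [show ("emergency_fund" : String) = pget 0 from by decide]
        exact List.contains_iff_mem.mpr hmem
      simp only [aLoop, pgList, ck]
      simp [pget, pgList]
    · -- m = 1
      have hmem : pget 1 ∈ goals := by
        have := mem_of_minr goals (by omega)
        rwa [← hm] at this
      have ck : goals.contains "debt_payoff" = true := by
        rw [show ("debt_payoff" : String) = pget 1 from by decide]
        exact List.contains_iff_mem.mpr hmem
      have c0 : goals.contains "emergency_fund" = false := by
        have := hcontains 0 (by omega) (by omega)
        rwa [show pget 0 = ("emergency_fund" : String) from by decide] at this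
      simp only [aLoop, pgList, c0, ck]
      simp [pget, pgList]
    · -- m = 2
      have hmem : pget 2 ∈ goals := by
        have := mem_of_minr goals (by omega)
        rwa [← hm] at this
      have ck : goals.contains "savings" = true := by
        rw [show ("savings" : String) = pget 2 from by decide]
        exact List.contains_iff_mem.mpr hmem
      have c0 : goals.contains "emergency_fund" = false := by
        have := hcontains 0 (by omega) (by omega)
        rwa [show pget 0 = ("emergency_fund" : String) from by decide] at this
      have c1 : goals.contains "debt_payoff" = false := by
        have := hcontains 1 (by omega) (by omega)
        rwa [show pget 1 = ("debt_payoff" : String) from by decide] at this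
      simp only [aLoop, pgList, c0, c1, ck]
      simp [pget, pgList]
    · -- m = 3
      have hmem : pget 3 ∈ goals := by
        have := mem_of_minr goals (by omega)
        rwa [← hm] at this
      have ck : goals.contains "investment" = true := by
        rw [show ("investment" : String) = pget 3 from by decide]
        exact List.contains_iff_mem.mpr hmem
      have c0 : goals.contains "emergency_fund" = false := by
        have := hcontains 0 (by omega) (by omega)
        rwa [show pget 0 = ("emergency_fund" : String) from by decide] at this
      have c1 : goals.contains "debt_payoff" = false := by
        have := hcontains 1 (by omega) (by omega)
        rwa [show pget 1 = ("debt_payoff" : String) from by decide] at this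
      have c2 : goals.contains "savings" = false := by
        have := hcontains 2 (by omega) (by omega)
        rwa [show pget 2 = ("savings" : String) from by decide] at this
      simp only [aLoop, pgList, c0, c1, c2, ck]
      simp [pget, pgList]
    · -- m = 4
      have hmem : pget 4 ∈ goals := by
        have := mem_of_minr goals (by omega)
        rwa [← hm] at this
      have ck : goals.contains "retirement" = true := by
        rw [show ("retirement" : String) = pget 4 from by decide]
        exact List.contains_iff_mem.mpr hmem
      have c0 : goals.contains "emergency_fund" = false := by
        have := hcontains 0 (by omega) (by omega)
        rwa [show pget 0 = ("emergency_fund" : String) from by decide] at this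
      have c1 : goals.contains "debt_payoff" = false := by
        have := hcontains 1 (by omega) (by omega)
        rwa [show pget 1 = ("debt_payoff" : String) from by decide] at this
      have c2 : goals.contains "savings" = false := by
        have := hcontains 2 (by omega) (by omega)
        rwa [show pget 2 = ("savings" : String) from by decide] at this
      have c3 : goals.contains "investment" = false := by
        have := hcontains 3 (by omega) (by omega)
        rwa [show pget 3 = ("investment" : String) from by decide] at this
      simp only [aLoop, pgList, c0, c1, c2, c3, ck]
      simp [pget, pgList]
    · -- m = 5
      have hmem : pget 5 ∈ goals := by
        have := mem_of_minr goals (by omega)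
        rwa [← hm] at this
      have ck : goals.contains "home_purchase" = true := by
        rw [show ("home_purchase" : String) = pget 5 from by decide]
        exact List.contains_iff_mem.mpr hmem
      have c0 : goals.contains "emergency_fund" = false := by
        have := hcontains 0 (by omega) (by omega)
        rwa [show pget 0 = ("emergency_fund" : String) from by decide] at this
      have c1 : goals.contains "debt_payoff" = false := by
        have := hcontains 1 (by omega) (by omega)
        rwa [show pget 1 = ("debt_payoff" : String) from by decide] at this
      have c2 : goals.contains "savings" = false := by
        have := hcontains 2 (by omega) (by omega)
        rwa [show pget 2 = ("savings" : String) from by decide] at this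
      have c3 : goals.contains "investment" = false := by
        have := hcontains 3 (by omega) (by omega)
        rwa [show pget 3 = ("investment" : String) from by decide] at this
      have c4 : goals.contains "retirement" = false := by
        have := hcontains 4 (by omega) (by omega)
        rwa [show pget 4 = ("retirement" : String) from by decide] at this
      simp only [aLoop, pgList, c0, c1, c2, c3, c4, ck]
      simp [pget, pgList]
    · -- m = 6 : no priority goal occurs in goals
      have c0 : goals.contains "emergency_fund" = false := by
        have := hcontains 0 (by omega) (by omega)
        rwa [show pget 0 = ("emergency_fund" : String) from by decide] at this
      have c1 : goals.contains "debt_payoff" = false := by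
        have := hcontains 1 (by omega) (by omega)
        rwa [show pget 1 = ("debt_payoff" : String) from by decide] at this
      have c2 : goals.contains "savings" = false := by
        have := hcontains 2 (by omega) (by omega)
        rwa [show pget 2 = ("savings" : String) from by decide] at this
      have c3 : goals.contains "investment" = false := by
        have := hcontains 3 (by omega) (by omega)
        rwa [show pget 3 = ("investment" : String) from by decide] at this
      have c4 : goals.contains "retirement" = false := by
        have := hcontains 4 (by omega) (by omega)
        rwa [show pget 4 = ("retirement" : String) from by decide] at this
      have c5 : goals.contains "home_purchase" = false := by
        have := hcontains 5 (by omega) (by omega)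
        rwa [show pget 5 = ("home_purchase" : String) from by decide] at this
      simp only [aLoop, pgList, c0, c1, c2, c3, c4, c5]
      simp
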